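-- pv_equiv track=rewrite | github.com/jrodriguezgar/FormuLite | shortfx/fxString/string_operations.py | text_before
-- ===== SOURCE A (Python) =====
-- def text_before(
--     text: str, delimiter: str, instance_num: int = 1
-- ) -> str:
--     """Returns text that occurs before a given delimiter.
--
--     Description:
--         Returns the portion of text before the Nth occurrence of the
--         delimiter. Negative instance_num searches from the end.
--         Equivalent to Excel TEXTBEFORE.
--
--     Args:
--         text: The input text to search.
--         delimiter: The delimiter to search for.
--         instance_num: Which occurrence (1 = first, -1 = last, etc.).
--
--     Returns:
--         The text before the specified occurrence of the delimiter.
--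
--     Raises:
--         TypeError: If text or delimiter are not strings.
--         ValueError: If instance_num is 0 or delimiter is not found.
--
--     Example:
--         >>> text_before("hello-world-test", "-")
--         'hello'
--         >>> text_before("hello-world-test", "-", 2)
--         'hello-world'
--         >>> text_before("hello-world-test", "-", -1)
--         'hello-world'
--
--     Complexity: O(n)
--     """
--     if not isinstance(text, str) or not isinstance(delimiter, str):
--         raise TypeError("text and delimiter must be strings.")
--
--     if instance_num == 0:
--         raise ValueError("instance_num cannot be 0.")
--
--     if instance_num > 0:
--         count = 0
--         start = 0
--
--         while True:
--             pos = text.find(delimiter, start)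
--
--             if pos == -1:
--                 break
--
--             count += 1
--
--             if count == instance_num:
--                 return text[:pos]
--
--             start = pos + len(delimiter)
--
--         raise ValueError(f"Delimiter '{delimiter}' not found {instance_num} time(s).")
--
--     # Negative: search from end
--     count = 0
--     end = len(text)
--
--     while True:
--         pos = text.rfind(delimiter, 0, end)
--
--         if pos == -1:
--             break
--
--         count += 1
--
--         if count == abs(instance_num):
--             return text[:pos]
--
--         end = pos
--
--     raise ValueError(f"Delimiter '{delimiter}' not found {abs(instance_num)} time(s) from end.")
-- ===== SOURCE B (Python) =====
-- def text_before(
--     text: str, delimiter: str, instance_num: int = 1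
-- ) -> str:
--     """Text before the Nth occurrence of delimiter, via split/rsplit + join."""
--     if not isinstance(text, str) or not isinstance(delimiter, str):
--         raise TypeError("text and delimiter must be strings.")
--
--     if instance_num == 0:
--         raise ValueError("instance_num cannot be 0.")
--
--     if delimiter == "":
--         # Empty delimiter matches at the start (positive) / end (negative),
--         # as in Excel's TEXTBEFORE.
--         return "" if instance_num > 0 else text
--
--     if instance_num > 0:
--         parts = text.split(delimiter, instance_num)
--         if len(parts) <= instance_num:
--             raise ValueError(
--                 f"Delimiter '{delimiter}' not found {instance_num} time(s)."
--             )
--         return delimiter.join(parts[:instance_num])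
--
--     k = -instance_num
--     parts = text.rsplit(delimiter, k)
--     if len(parts) <= k:
--         raise ValueError(f"Delimiter '{delimiter}' not found {k} time(s) from end.")
--     return delimiter.join(parts[:-k])
-- ===== Notes on version B (the rewrite author's own statement) =====
-- stated objective: idiomatic
-- what changed: The hand-written find/rfind scanning loops with running count/start/end state are replaced by single calls to the standard-library str.split(delimiter, n) / str.rsplit(delimiter, n) followed by a length check and delimiter.join of the kept parts; the empty delimiter (where split would reject the separator) is answered directly by its Excel TEXTBEFORE meaning, '' for positive n and the whole text for negative n, exactly as A computes it.
import Mathlib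
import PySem

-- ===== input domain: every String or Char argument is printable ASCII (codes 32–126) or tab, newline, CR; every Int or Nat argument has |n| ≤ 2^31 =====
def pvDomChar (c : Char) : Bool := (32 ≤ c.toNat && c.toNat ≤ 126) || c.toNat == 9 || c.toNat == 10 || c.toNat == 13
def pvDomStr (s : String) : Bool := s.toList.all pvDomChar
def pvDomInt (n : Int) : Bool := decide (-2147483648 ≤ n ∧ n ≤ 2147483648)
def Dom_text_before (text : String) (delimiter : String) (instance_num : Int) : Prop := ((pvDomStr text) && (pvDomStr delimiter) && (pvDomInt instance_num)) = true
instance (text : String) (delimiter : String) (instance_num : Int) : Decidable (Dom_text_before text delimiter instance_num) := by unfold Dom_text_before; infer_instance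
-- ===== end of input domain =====

-- B replaces A's hand-written find/rfind scanning loops by split/rsplit + join (idiomatic); return-value equivalence.

-- ===== PORT A =====
-- positive branch of A: the 'while True: pos = text.find(delimiter, start)' loop.
-- fuel = instance_num - count (the loop increments count once per iteration, so it
-- runs at most instance_num times); 'fuel = 0' after an increment is 'count == instance_num'.
def aPosGo (s d : List Char) : Nat → Nat → List Char
  | 0, _ => []                                   -- never reached (initial fuel = instance_num ≥ 1)
  | fuel+1, start =>
    let pos := PySem.Chars.findFrom s d (start : Int) none
    if pos = -1 then []                          -- raise ValueError (not found; outside Pre_)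
    else if fuel = 0 then s.take pos.toNat       -- count == instance_num: return text[:pos]
    else aPosGo s d fuel (pos.toNat + d.length)  -- start = pos + len(delimiter)

-- negative branch of A: the 'pos = text.rfind(delimiter, 0, end)' loop, fuel = |instance_num| - count.
def aNegGo (s d : List Char) : Nat → Nat → List Char
  | 0, _ => []
  | fuel+1, e =>
    let pos := PySem.Chars.rfindFrom s d 0 (some (e : Int))
    if pos = -1 then []                          -- raise ValueError (not found; outside Pre_)
    else if fuel = 0 then s.take pos.toNat       -- count == abs(instance_num): return text[:pos]
    else aNegGo s d fuel pos.toNat               -- end = pos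

def text_before (text : String) (delimiter : String) (instance_num : Int) : String :=
  if instance_num = 0 then ""                    -- raise ValueError (outside Pre_)
  else if instance_num > 0 then
    String.ofList (aPosGo text.toList delimiter.toList instance_num.toNat 0)
  else
    String.ofList (aNegGo text.toList delimiter.toList instance_num.natAbs text.toList.length)

-- ===== PORT B =====
-- hand port of Python's str.rsplit(sep, maxsplit) for sep ≠ "" (PySem has no rsplit):
-- at most maxsplit splits, each at the rightmost occurrence inside the remaining prefix (exact there).
def rsGo (s d : List Char) : Nat → List (List Char)
  | 0 => [s]
  | k+1 =>
    let p := PySem.Chars.rfind s d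
    if p = -1 then [s]
    else rsGo (s.take p.toNat) d k ++ [s.drop (p.toNat + d.length)]

def text_before_alt (text : String) (delimiter : String) (instance_num : Int) : String :=
  if instance_num = 0 then ""                    -- raise ValueError (outside Pre_)
  else if delimiter = "" then
    -- empty delimiter: matches at the start (positive) / end (negative), as in Excel TEXTBEFORE
    if instance_num > 0 then "" else text
  else if instance_num > 0 then
    match PySem.Str.splitMax? text delimiter instance_num with
    | none => ""                                 -- unreachable: delimiter ≠ "" here
    | some parts =>
      if (parts.length : Int) ≤ instance_num then ""   -- raise ValueError (not found; outside Pre_)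
      else PySem.Str.join delimiter (PySem.List.slice parts none (some instance_num))  -- parts[:instance_num]
  else
    let partsL := rsGo text.toList delimiter.toList instance_num.natAbs  -- text.rsplit(delimiter, k)
    let parts := partsL.map String.ofList
    if (parts.length : Int) ≤ (instance_num.natAbs : Int) then ""   -- raise ValueError (outside Pre_)
    else PySem.Str.join delimiter (PySem.List.slice parts none (some (-(instance_num.natAbs : Int))))  -- parts[:-k]

-- ===== PRECONDITION & SPEC =====
-- Pre_ = exactly the inputs where Python A returns: A raises ValueError when instance_num = 0 or when a
-- non-empty delimiter occurs fewer than |instance_num| times; for the empty delimiter A always returns.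
def Pre_text_before (text : String) (delimiter : String) (instance_num : Int) : Prop :=
  instance_num ≠ 0 ∧ (delimiter = "" ∨ instance_num.natAbs ≤ PySem.Str.count text delimiter)
instance (text : String) (delimiter : String) (instance_num : Int) : Decidable (Pre_text_before text delimiter instance_num) := by unfold Pre_text_before; infer_instance

def pvWitness_text_before : String × String × Int := ("hello-world-test", "-", 2)

def Spec_text_before (text : String) (delimiter : String) (instance_num : Int) (out : String) : Prop := out = text_before_alt text delimiter instance_num
instance (text : String) (delimiter : String) (instance_num : Int) (out : String) : Decidable (Spec_text_before text delimiter instance_num out) := by unfold Spec_text_before; infer_instance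

-- ===== CLAIM (what is proved, stated in full; the proofs are below) =====
def Claim_equal_text_before : Prop := ∀ (text : String) (delimiter : String) (instance_num : Int), Dom_text_before text delimiter instance_num → Pre_text_before text delimiter instance_num → Spec_text_before text delimiter instance_num (text_before text delimiter instance_num)

-- ===== LEMMAS AND PROOFS =====

-- one-step unfolding helpers
theorem aPosGo_succ (s d : List Char) (fuel start : Nat) :
    aPosGo s d (fuel+1) start =
      (let pos := PySem.Chars.findFrom s d (start : Int) none
       if pos = -1 then []
       else if fuel = 0 then s.take pos.toNat
       else aPosGo s d fuel (pos.toNat + d.length)) := by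
  simp [aPosGo]

theorem aNegGo_succ (s d : List Char) (fuel e : Nat) :
    aNegGo s d (fuel+1) e =
      (let pos := PySem.Chars.rfindFrom s d 0 (some (e : Int))
       if pos = -1 then []
       else if fuel = 0 then s.take pos.toNat
       else aNegGo s d fuel pos.toNat) := by
  simp [aNegGo]

theorem rsGo_zero (s d : List Char) : rsGo s d 0 = [s] := rfl

theorem rsGo_succ (s d : List Char) (k : Nat) :
    rsGo s d (k+1) =
      (let p := PySem.Chars.rfind s d
       if p = -1 then [s]
       else rsGo (s.take p.toNat) d k ++ [s.drop (p.toNat + d.length)]) := by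
  simp [rsGo]

-- reference left-greedy bounded split: spN d m l = l.split(d, m) for d ≠ []
def spN (d : List Char) : Nat → List Char → List (List Char)
  | 0, l => [l]
  | m+1, l =>
    let p := PySem.Chars.find l d
    if p = -1 then [l] else l.take p.toNat :: spN d m (l.drop (p.toNat + d.length))

theorem spN_zero (d l : List Char) : spN d 0 l = [l] := rfl

theorem spN_succ (d : List Char) (m : Nat) (l : List Char) :
    spN d (m+1) l =
      (let p := PySem.Chars.find l d
       if p = -1 then [l] else l.take p.toNat :: spN d m (l.drop (p.toNat + d.length))) := by
  simp [spN]

def consHead (pre : List Char) : List (List Char) → List (List Char)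
  | [] => [pre]
  | x :: xs => (pre ++ x) :: xs

theorem consHead_nil (ys : List (List Char)) (hy : ys ≠ []) : consHead [] ys = ys := by
  cases ys with
  | nil => exact absurd rfl hy
  | cons x xs => simp [consHead]

theorem find_nil_of_ne (d : List Char) (hd : d ≠ []) : PySem.Chars.find [] d = -1 := by
  simp [PySem.Chars.find, PySem.Chars.find.go, List.isEmpty_iff, hd]

theorem find_zero_of_prefix (d l : List Char) (h : d.isPrefixOf l = true) :
    PySem.Chars.find l d = 0 := by
  cases l with
  | nil =>
    have hdn : d = [] := by simpa [List.isPrefixOf_iff_prefix] using h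
    subst hdn
    simp [PySem.Chars.find, PySem.Chars.find.go]
  | cons c r =>
    show PySem.Chars.find.go d (c :: r) 0 = 0
    rw [PySem.Chars.find.go.eq_2, if_pos h]
    simp

theorem find_go_shift (d : List Char) (hd : d ≠ []) :
    ∀ (t : List Char) (k : Nat), PySem.Chars.find.go d t k =
      if PySem.Chars.find t d = -1 then -1 else PySem.Chars.find t d + k := by
  intro t
  induction t with
  | nil =>
    intro k
    simp [PySem.Chars.find, PySem.Chars.find.go, List.isEmpty_iff, hd]
  | cons c r ih =>
    intro k
    by_cases h : d.isPrefixOf (c :: r) = true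
    · have h0 : PySem.Chars.find (c :: r) d = 0 := find_zero_of_prefix d _ h
      rw [PySem.Chars.find.go.eq_2, if_pos h, h0]
      norm_num
    · have hgo : ∀ j : Nat, PySem.Chars.find.go d (c :: r) j = PySem.Chars.find.go d r (j+1) := by
        intro j; rw [PySem.Chars.find.go.eq_2, if_neg h]
      have hf : PySem.Chars.find (c :: r) d = PySem.Chars.find.go d r 1 := by
        show PySem.Chars.find.go d (c :: r) 0 = _
        rw [hgo 0]
      have h1 : -1 ≤ PySem.Chars.find r d := PySem.Chars.neg_one_le_find r d
      rw [hgo k, ih (k+1), hf, ih 1]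
      split_ifs <;> omega

theorem find_cons (d : List Char) (hd : d ≠ []) (c : Char) (r : List Char)
    (h : ¬ d.isPrefixOf (c :: r) = true) :
    PySem.Chars.find (c :: r) d =
      if PySem.Chars.find r d = -1 then -1 else PySem.Chars.find r d + 1 := by
  have hf : PySem.Chars.find (c :: r) d = PySem.Chars.find.go d r 1 := by
    show PySem.Chars.find.go d (c :: r) 0 = _
    rw [PySem.Chars.find.go.eq_2, if_neg h]
  rw [hf, find_go_shift d hd r 1]
  norm_cast

theorem spN_ne_nil (d : List Char) (m : Nat) (l : List Char) : spN d m l ≠ [] := by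
  cases m with
  | zero => simp [spN]
  | succ m => rw [spN_succ]; dsimp only; split <;> simp

theorem spN_length_le (d : List Char) : ∀ (m : Nat) (l : List Char), (spN d m l).length ≤ m + 1 := by
  intro m
  induction m with
  | zero => intro l; simp [spN]
  | succ m ih =>
    intro l
    rw [spN_succ]; dsimp only
    split
    · simp
    · simp only [List.length_cons]
      have := ih (l.drop ((PySem.Chars.find l d).toNat + d.length))
      omega

theorem go_spec (d : List Char) (hd : d ≠ []) :
    ∀ (fuel m : Nat) (l cur : List Char) (acc : List (List Char)), l.length < fuel →
      PySem.Chars.splitOnMax.go d fuel m l cur acc =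
        acc.reverse ++ consHead cur.reverse (spN d m l) := by
  intro fuel
  induction fuel with
  | zero => intro m l cur acc h; omega
  | succ fuel ih =>
    intro m l cur acc h
    have hL1 : 0 < d.length := by
      cases d with
      | nil => exact absurd rfl hd
      | cons a t => simp
    cases l with
    | nil =>
      have hgo : PySem.Chars.splitOnMax.go d (fuel+1) m [] cur acc = (cur.reverse :: acc).reverse := by
        simp [PySem.Chars.splitOnMax.go]
      have hs : spN d m [] = [[]] := by
        cases m with
        | zero => simp [spN]
        | succ m => rw [spN_succ]; simp [find_nil_of_ne d hd]
      rw [hgo, hs]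
      simp [consHead]
    | cons c rest =>
      cases m with
      | zero =>
        have hgo : PySem.Chars.splitOnMax.go d (fuel+1) 0 (c :: rest) cur acc =
            ((cur.reverse ++ (c :: rest)) :: acc).reverse := by
          simp [PySem.Chars.splitOnMax.go]
        rw [hgo, spN_zero]
        simp [consHead]
      | succ m' =>
        by_cases hpre : d.isPrefixOf (c :: rest) = true
        · have hgo : PySem.Chars.splitOnMax.go d (fuel+1) (m'+1) (c :: rest) cur acc =
              PySem.Chars.splitOnMax.go d fuel m' (List.drop d.length (c :: rest)) [] (cur.reverse :: acc) := by
            simp [PySem.Chars.splitOnMax.go, hpre]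
        -- length decreases enough
          have hlen : (List.drop d.length (c :: rest)).length < fuel := by
            simp only [List.length_drop, List.length_cons] at *
            omega
          rw [hgo, ih m' _ [] _ hlen]
          have hsp : spN d (m'+1) (c :: rest) = [] :: spN d m' (List.drop d.length (c :: rest)) := by
            rw [spN_succ]
            simp [find_zero_of_prefix d _ hpre]
          rw [hsp]
          simp only [List.reverse_nil]
          rw [consHead_nil _ (spN_ne_nil d m' _)]
          simp [consHead]
        · have hgo : PySem.Chars.splitOnMax.go d (fuel+1) (m'+1) (c :: rest) cur acc =
              PySem.Chars.splitOnMax.go d fuel (m'+1) rest (c :: cur) acc := by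
            simp [PySem.Chars.splitOnMax.go, hpre]
          have hlen : rest.length < fuel := by
            simp only [List.length_cons] at h
            omega
          rw [hgo, ih (m'+1) _ _ _ hlen]
          have hkey : consHead (c :: cur).reverse (spN d (m'+1) rest) =
              consHead cur.reverse (spN d (m'+1) (c :: rest)) := by
            have hneg1 := PySem.Chars.neg_one_le_find rest d
            have hfc := find_cons d hd c rest hpre
            by_cases hfr : PySem.Chars.find rest d = -1
            · have h1 : spN d (m'+1) rest = [rest] := by rw [spN_succ]; simp [hfr]
              have h2 : spN d (m'+1) (c :: rest) = [c :: rest] := by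
                rw [spN_succ]; simp [hfc, hfr]
              rw [h1, h2]
              simp [consHead]
            · have hp0 : 0 ≤ PySem.Chars.find rest d := by omega
              have h1 : spN d (m'+1) rest =
                  rest.take (PySem.Chars.find rest d).toNat ::
                    spN d m' (rest.drop ((PySem.Chars.find rest d).toNat + d.length)) := by
                rw [spN_succ]; simp [hfr]
              have htn : (PySem.Chars.find rest d + 1).toNat = (PySem.Chars.find rest d).toNat + 1 := by
                omega
              have h2 : spN d (m'+1) (c :: rest) =
                  (c :: rest.take (PySem.Chars.find rest d).toNat) ::
                    spN d m' (rest.drop ((PySem.Chars.find rest d).toNat + d.length)) := by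
                rw [spN_succ]
                dsimp only
                rw [hfc, if_neg hfr]
                rw [if_neg (show ¬ (PySem.Chars.find rest d + 1 = -1) by omega)]
                rw [htn]
                rw [List.take_succ_cons]
                rw [show (PySem.Chars.find rest d).toNat + 1 + d.length =
                    ((PySem.Chars.find rest d).toNat + d.length) + 1 from by omega,
                  List.drop_succ_cons]
              rw [h1, h2]
              simp [consHead]
          rw [hkey]

theorem splitOnMax_eq_spN (d l : List Char) (hd : d ≠ []) (n : Int) (hn : 0 ≤ n) :
    PySem.Chars.splitOnMax l d n = spN d n.toNat l := by
  rw [PySem.Chars.splitOnMax.eq_1, if_neg (by omega)]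
  rw [go_spec d hd (l.length + 1) n.toNat l [] [] (by omega)]
  simp [consHead_nil _ (spN_ne_nil d n.toNat l)]

theorem pos_main (d : List Char) (hd : d ≠ []) :
    ∀ (m : Nat) (l : List Char) (k : Nat), k ≤ l.length →
      aPosGo l d (m+1) k =
        if (spN d (m+1) (l.drop k)).length = m + 2
        then l.take k ++ PySem.Chars.join d ((spN d (m+1) (l.drop k)).take (m+1))
        else [] := by
  intro m
  induction m with
  | zero =>
    intro l k hk
    rw [aPosGo_succ]
    dsimp only
    rw [PySem.Chars.findFrom_natCast l d k hk]
    have hneg1 := PySem.Chars.neg_one_le_find (l.drop k) d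
    by_cases h1 : PySem.Chars.find (l.drop k) d = -1
    · rw [spN_succ]
      simp [h1]
    · have hp0 : 0 ≤ PySem.Chars.find (l.drop k) d := by omega
      rw [spN_succ]
      dsimp only
      rw [if_neg h1, if_neg h1]
      rw [if_neg (show ¬ ((k : Int) + PySem.Chars.find (l.drop k) d = -1) by omega)]
      have htn : ((k : Int) + PySem.Chars.find (l.drop k) d).toNat =
          k + (PySem.Chars.find (l.drop k) d).toNat := by omega
      rw [htn, List.take_add]
      simp [spN_zero, PySem.Chars.join_singleton]
  | succ m ih =>
    intro l k hk
    rw [aPosGo_succ]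
    dsimp only
    rw [PySem.Chars.findFrom_natCast l d k hk]
    have hneg1 := PySem.Chars.neg_one_le_find (l.drop k) d
    have hL1 : 0 < d.length := by
      cases d with
      | nil => exact absurd rfl hd
      | cons a t => simp
    by_cases h1 : PySem.Chars.find (l.drop k) d = -1
    · rw [spN_succ]
      simp [h1]
    · have hp0 : 0 ≤ PySem.Chars.find (l.drop k) d := by omega
      set p : Nat := (PySem.Chars.find (l.drop k) d).toNat with hpdef
      have hpfx : d <+: (l.drop k).drop p := (PySem.Chars.find_spec hp0).1
      have hplen : p ≤ (l.drop k).length := by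
        have := PySem.Chars.find_le_length (l.drop k) d
        omega
      have hdlen : d.length ≤ ((l.drop k).drop p).length := hpfx.length_le
      have hklen : k + p + d.length ≤ l.length := by
        simp only [List.length_drop] at hplen hdlen
        omega
      have hdrop : (l.drop k).drop (p + d.length) = l.drop (k + p + d.length) := by
        rw [List.drop_drop]
        congr 1
        omega
      have hpfx' : d <+: l.drop (k + p) := by rwa [List.drop_drop] at hpfx
      have htake : l.take (k + p + d.length) = l.take k ++ (l.drop k).take p ++ d := by
        calc l.take (k + p + d.length)
            = l.take (k + p) ++ (l.drop (k + p)).take d.length := List.take_add ..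
          _ = l.take k ++ (l.drop k).take p ++ d := by
              rw [List.take_add, ← List.prefix_iff_eq_take.mp hpfx']
      have hsp : spN d (m+1+1) (l.drop k) =
          (l.drop k).take p :: spN d (m+1) (l.drop (k + p + d.length)) := by
        rw [spN_succ]
        dsimp only
        rw [if_neg h1, ← hpdef, hdrop]
      rw [if_neg h1]
      rw [if_neg (show ¬ ((k : Int) + PySem.Chars.find (l.drop k) d = -1) by omega)]
      rw [if_neg (show ¬ (m + 1 = 0) by omega)]
      have htn : ((k : Int) + PySem.Chars.find (l.drop k) d).toNat = k + p := by omega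
      rw [htn]
      rw [ih l (k + p + d.length) hklen]
      rw [hsp]
      obtain ⟨y, ys, hsub⟩ : ∃ y ys, spN d (m+1) (l.drop (k + p + d.length)) = y :: ys := by
        cases hs : spN d (m+1) (l.drop (k + p + d.length)) with
        | nil => exact absurd hs (spN_ne_nil d (m+1) _)
        | cons y ys => exact ⟨y, ys, rfl⟩
      rw [hsub]
      simp only [List.length_cons]
      split_ifs with hc1 hc2 hc2
      · rw [htake]
        simp only [List.take_succ_cons, PySem.Chars.join_cons_cons, List.append_assoc]
      · omega
      · omega
      · rfl

theorem rfind_go_bounds (s d : List Char) : ∀ (j : Nat),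
    -1 ≤ PySem.Chars.rfind.go s d j ∧ PySem.Chars.rfind.go s d j ≤ (j : Int) := by
  intro j
  induction j with
  | zero =>
    rw [PySem.Chars.rfind.go]
    split <;> simp
  | succ j ih =>
    rw [PySem.Chars.rfind.go.eq_2]
    split
    · constructor <;> omega
    · obtain ⟨h1, h2⟩ := ih
      constructor <;> [omega; omega]

theorem rfind_bounds (u d : List Char) :
    -1 ≤ PySem.Chars.rfind u d ∧ PySem.Chars.rfind u d ≤ (u.length : Int) :=
  rfind_go_bounds u d u.length

theorem rfindFrom_zero_some (l d : List Char) (e : Nat) (he : e ≤ l.length) :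
    PySem.Chars.rfindFrom l d 0 (some (e : Int)) =
      if PySem.Chars.rfind (l.take e) d = -1 then -1 else PySem.Chars.rfind (l.take e) d := by
  have h1 : ¬ ((l.length : Int) < (e : Int)) := by omega
  have h2 : ¬ ((e : Int) < 0) := by omega
  simp only [PySem.Chars.rfindFrom, h1, h2, if_false]
  norm_num

theorem rsGo_length_le (d : List Char) : ∀ (k : Nat) (u : List Char), (rsGo u d k).length ≤ k + 1 := by
  intro k
  induction k with
  | zero => intro u; simp [rsGo]
  | succ k ih =>
    intro u
    rw [rsGo_succ]
    dsimp only
    split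
    · simp
    · simp only [List.length_append, List.length_singleton]
      have := ih (u.take (PySem.Chars.rfind u d).toNat)
      omega

theorem neg_main (d : List Char) :
    ∀ (m : Nat) (l : List Char) (e : Nat), e ≤ l.length →
      aNegGo l d (m+1) e =
        if (rsGo (l.take e) d (m+1)).length = m + 2
        then PySem.Chars.join d ((rsGo (l.take e) d (m+1)).take ((rsGo (l.take e) d (m+1)).length - (m+1)))
        else [] := by
  intro m
  induction m with
  | zero =>
    intro l e he
    rw [aNegGo_succ]
    dsimp only
    rw [rfindFrom_zero_some l d e he]
    obtain ⟨hb1, hb2⟩ := rfind_bounds (l.take e) d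
    by_cases h1 : PySem.Chars.rfind (l.take e) d = -1
    · rw [rsGo_succ]
      simp [h1]
    · have hp0 : 0 ≤ PySem.Chars.rfind (l.take e) d := by omega
      have hple : (PySem.Chars.rfind (l.take e) d).toNat ≤ e := by
        simp only [List.length_take] at hb2
        omega
      have hR : rsGo (l.take e) d (0+1) =
          [(l.take e).take (PySem.Chars.rfind (l.take e) d).toNat,
           (l.take e).drop ((PySem.Chars.rfind (l.take e) d).toNat + d.length)] := by
        rw [rsGo_succ]
        dsimp only
        rw [if_neg h1, rsGo_zero]
        rfl
      rw [if_neg h1, if_neg h1, hR]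
      simp [List.take_take, min_eq_left hple, PySem.Chars.join_singleton]
  | succ m ih =>
    intro l e he
    rw [aNegGo_succ]
    dsimp only
    rw [rfindFrom_zero_some l d e he]
    obtain ⟨hb1, hb2⟩ := rfind_bounds (l.take e) d
    by_cases h1 : PySem.Chars.rfind (l.take e) d = -1
    · rw [rsGo_succ]
      simp [h1]
    · have hp0 : 0 ≤ PySem.Chars.rfind (l.take e) d := by omega
      set p : Nat := (PySem.Chars.rfind (l.take e) d).toNat with hpdef
      have hple : p ≤ e := by
        simp only [List.length_take] at hb2
        omega
      have htt : (l.take e).take p = l.take p := by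
        rw [List.take_take, min_eq_left hple]
      have hR : rsGo (l.take e) d (m+1+1) =
          rsGo (l.take p) d (m+1) ++ [(l.take e).drop (p + d.length)] := by
        rw [rsGo_succ]
        dsimp only
        rw [if_neg h1, ← hpdef, htt]
      rw [if_neg h1, if_neg h1, if_neg (show ¬ (m + 1 = 0) by omega)]
      rw [ih l p (le_trans hple he)]
      rw [hR]
      set sub := rsGo (l.take p) d (m+1) with hsubdef
      have hsl : sub.length ≤ m + 2 := rsGo_length_le d (m+1) (l.take p)
      simp only [List.length_append, List.length_cons, List.length_nil]
      split_ifs with hc1 hc2 hc2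
      · rw [List.take_append_of_le_length (by omega : sub.length + (0+1) - (m+1+1) ≤ sub.length)]
        congr 2
        omega
      · omega
      · omega
      · rfl

-- empty delimiter, positive branch: find(s, '', start) = start, start stays 0, so A returns text[:0] = []
theorem aPosGo_nil (s : List Char) : ∀ (m : Nat), aPosGo s [] (m+1) 0 = [] := by
  intro m
  induction m with
  | zero =>
    rw [aPosGo_succ]
    dsimp only
    rw [PySem.Chars.findFrom_natCast s [] 0 (by omega)]
    rw [find_zero_of_prefix [] _ (by simp [List.isPrefixOf])]
    norm_num
  | succ m ih =>
    rw [aPosGo_succ]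
    dsimp only
    rw [PySem.Chars.findFrom_natCast s [] 0 (by omega)]
    rw [find_zero_of_prefix [] _ (by simp [List.isPrefixOf])]
    norm_num
    exact ih

theorem rfind_nil (u : List Char) : PySem.Chars.rfind u [] = (u.length : Int) := by
  show PySem.Chars.rfind.go u [] u.length = _
  cases hu : u.length with
  | zero =>
    rw [PySem.Chars.rfind.go]
    simp [List.isPrefixOf]
  | succ j =>
    rw [PySem.Chars.rfind.go.eq_2]
    rw [if_pos (by simp [List.isPrefixOf])]

-- empty delimiter, negative branch: rfind(s, '', 0, end) = end, end stays len(s), so A returns text[:len] = s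
theorem aNegGo_nil (s : List Char) : ∀ (m : Nat), aNegGo s [] (m+1) s.length = s := by
  intro m
  induction m with
  | zero =>
    rw [aNegGo_succ]
    dsimp only
    rw [rfindFrom_zero_some s [] s.length (le_refl _), List.take_length, rfind_nil]
    rw [if_neg (show ¬ ((s.length : Int) = -1) by omega)]
    rw [if_neg (show ¬ ((s.length : Int) = -1) by omega)]
    simp
  | succ m ih =>
    rw [aNegGo_succ]
    dsimp only
    rw [rfindFrom_zero_some s [] s.length (le_refl _), List.take_length, rfind_nil]
    rw [if_neg (show ¬ ((s.length : Int) = -1) by omega)]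
    rw [if_neg (show ¬ ((s.length : Int) = -1) by omega)]
    rw [if_neg (show ¬ (m + 1 = 0) by omega)]
    rw [show ((s.length : Int)).toNat = s.length from by omega]
    exact ih

-- ===== VERDICT (by name: the statement is the Claim_ definition above) =====
theorem text_before_spec : Claim_equal_text_before := by
  intro text delimiter n _hDom hPre
  obtain ⟨hn0, hPre2⟩ := hPre
  unfold Spec_text_before text_before text_before_alt
  by_cases hδ : delimiter = ""
  · -- empty delimiter: A's loops return '' (positive) / text (negative); B answers directly
    subst hδ
    rw [if_neg hn0, if_neg hn0, if_pos rfl]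
    have hdl : ("" : String).toList = ([] : List Char) := rfl
    rcases lt_trichotomy n 0 with hneg | hz | hpos
    · rw [if_neg (by omega : ¬ n > 0), if_neg (by omega : ¬ n > 0)]
      obtain ⟨m, hm⟩ : ∃ m, n.natAbs = m + 1 := ⟨n.natAbs - 1, by omega⟩
      rw [hdl, hm, aNegGo_nil text.toList m]
      exact String.ofList_toList
    · exact absurd hz hn0
    · rw [if_pos hpos, if_pos hpos]
      obtain ⟨m, hm⟩ : ∃ m, n.toNat = m + 1 := ⟨n.toNat - 1, by omega⟩
      rw [hdl, hm, aPosGo_nil text.toList m]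
  · have hcnt : n.natAbs ≤ PySem.Str.count text delimiter := by
      cases hPre2 with
      | inl h => exact absurd h hδ
      | inr h => exact h
    have hdl : delimiter.toList ≠ [] := by
      intro hnil
      exact hδ (String.toList_inj.mp (by rw [hnil]; rfl))
    have hdEmp : delimiter.toList.isEmpty = false := by
      simp [hdl]
    rcases lt_trichotomy n 0 with hneg | hz | hpos
    · -- negative instance_num
      rw [if_neg hn0, if_neg hn0, if_neg hδ, if_neg (by omega : ¬ n > 0), if_neg (by omega : ¬ n > 0)]
      obtain ⟨m, hm⟩ : ∃ m, n.natAbs = m + 1 := ⟨n.natAbs - 1, by omega⟩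
      rw [hm]
      have hmain := neg_main delimiter.toList m text.toList text.toList.length (le_refl _)
      rw [List.take_length] at hmain
      rw [hmain]
      set X := rsGo text.toList delimiter.toList (m+1) with hXdef
      have hXle : X.length ≤ m + 2 := rsGo_length_le _ _ _
      simp only [List.length_map]
      by_cases hlen : X.length = m + 2
      · rw [if_pos hlen]
        rw [if_neg (show ¬ ((X.length : Int) ≤ ((m+1 : Nat) : Int)) by push_cast; omega)]
        apply String.toList_inj.mp
        rw [PySem.Str.toList_join, String.toList_ofList]
        rw [PySem.List.slice_to_neg_natCast _ _ (by omega : 0 < m + 1)]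
        rw [List.length_map]
        rw [← List.map_take, List.map_map]
        have hco : (String.toList ∘ String.ofList) = id := by
          funext x; simp [String.toList_ofList]
        rw [hco, List.map_id]
      · rw [if_neg hlen]
        rw [if_pos (show ((X.length : Int) ≤ ((m+1 : Nat) : Int)) by push_cast; omega)]
    · exact absurd hz hn0
    · -- positive instance_num
      rw [if_neg hn0, if_neg hn0, if_neg hδ, if_pos hpos, if_pos hpos]
      obtain ⟨m, hm⟩ : ∃ m, n.toNat = m + 1 := ⟨n.toNat - 1, by omega⟩
      have hncast : n = ((m + 1 : Nat) : Int) := by omega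
      rw [hm]
      have hBsplit : PySem.Str.splitMax? text delimiter n =
          some ((spN delimiter.toList (m+1) text.toList).map String.ofList) := by
        rw [PySem.Str.splitMax?.eq_1, PySem.Chars.splitMax?.eq_1]
        rw [if_neg (by simp [hdEmp])]
        rw [splitOnMax_eq_spN _ _ hdl n (by omega), hm]
        rfl
      rw [hBsplit]
      have hmain := pos_main delimiter.toList hdl m text.toList 0 (by omega)
      rw [List.drop_zero] at hmain
      rw [hmain]
      set X := spN delimiter.toList (m+1) text.toList with hXdef
      have hXle : X.length ≤ m + 2 := spN_length_le _ _ _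
      simp only [List.length_map]
      rw [hncast]
      by_cases hlen : X.length = m + 2
      · rw [if_pos hlen]
        rw [if_neg (show ¬ ((X.length : Int) ≤ ((m+1 : Nat) : Int)) by push_cast; omega)]
        apply String.toList_inj.mp
        rw [PySem.Str.toList_join, String.toList_ofList]
        rw [PySem.List.slice_to_natCast]
        rw [← List.map_take, List.map_map]
        have hco : (String.toList ∘ String.ofList) = id := by
          funext x; simp [String.toList_ofList]
        rw [hco, List.map_id]
        simp
      · rw [if_neg hlen]
        rw [if_pos (show ((X.length : Int) ≤ ((m+1 : Nat) : Int)) by push_cast; omega)]
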